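-- pv_equiv track=rewrite | github.com/adiens916/NOTE-algorithm | problems/Baekjoon_Online_Judge/18111_마인크래프트.py | brute_force_for_min_work_time
-- ===== SOURCE A (Python) =====
-- MAX_WORK_TIME = 256 * 25000 * 2
--
-- def brute_force_for_min_work_time(lands, B):
--     MAX_HEIGHT = 256
--
--     work_times = [0] * (MAX_HEIGHT + 1)
--     for height in range(MAX_HEIGHT + 1):
--         work_time = dig_then_put_for_height_with_blocks(lands, height, B)
--         work_times[height] = work_time
--
--     min_work_time = min(work_times)
--     heights = []
--     for height in range(MAX_HEIGHT + 1):
--         if min_work_time == work_times[height]: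
--             heights.append(height)
--
--     return min_work_time, heights[-1]
--
-- def dig_then_put_for_height_with_blocks(lands, flat, B) -> int:
--     work_time = 0
--
--     for line in lands:
--         for block in line:
--             if block >= flat:
--                 diff = block - flat
--                 # dig
--                 B += diff
--                 work_time += diff * 2
--
--             elif block < flat:
--                 diff = flat - block
--                 # put
--                 B -= diff
--                 work_time += diff
--
--     if B < 0:
--         return MAX_WORK_TIME
--     else:
--         return work_time
-- ===== SOURCE B (Python) =====
-- MAX_WORK_TIME = 256 * 25000 * 2
--
-- def brute_force_for_min_work_time(lands, B):
--     # One pass over the grid builds aggregates (count, sum, histogram of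
--     # heights 0..256, and count/sum of negative blocks); each candidate
--     # height is then scored in O(1) from running prefix count/sum.
--     n = 0
--     total = 0
--     cnt_neg = 0
--     sum_neg = 0
--     cnt = [0] * 257
--     for line in lands:
--         for b in line:
--             n += 1
--             total += b
--             if b < 0:
--                 cnt_neg += 1
--                 sum_neg += b
--             elif b <= 256:
--                 cnt[b] += 1
--     best = None
--     best_h = 0
--     c = cnt_neg          # number of blocks strictly below the current height
--     s = sum_neg          # their sum
--     for h in range(257):
--         dig = (total - s) - h * (n - c)
--         put = h * c - s
--         work = MAX_WORK_TIME if B + dig - put < 0 else dig * 2 + put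
--         if best is None or work <= best:
--             best = work
--             best_h = h
--         c += cnt[h]
--         s += h * cnt[h]
--     return best, best_h
-- ===== Notes on version B (the rewrite author's own statement) =====
-- stated objective: faster
-- what changed: Instead of rescanning the whole grid for each of the 257 candidate heights, B makes one pass building count/sum aggregates and a height histogram, then scores every candidate height in O(1) from running prefix count/sum.
import Mathlib
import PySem

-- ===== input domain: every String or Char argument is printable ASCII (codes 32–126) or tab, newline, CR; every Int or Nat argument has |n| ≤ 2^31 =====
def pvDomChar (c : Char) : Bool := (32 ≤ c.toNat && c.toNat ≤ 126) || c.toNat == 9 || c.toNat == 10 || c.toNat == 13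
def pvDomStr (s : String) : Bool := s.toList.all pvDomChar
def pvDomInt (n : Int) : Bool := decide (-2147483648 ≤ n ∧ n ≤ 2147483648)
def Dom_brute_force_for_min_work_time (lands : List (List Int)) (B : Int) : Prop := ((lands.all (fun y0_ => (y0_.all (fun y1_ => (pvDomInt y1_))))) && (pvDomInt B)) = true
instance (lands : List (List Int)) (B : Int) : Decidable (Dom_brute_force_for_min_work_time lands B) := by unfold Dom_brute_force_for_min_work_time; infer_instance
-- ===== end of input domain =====

-- B replaces A's 257 full-grid rescans by one aggregation pass (count/sum/histogram)
-- plus an O(1) prefix-sum score per candidate height: asymptotically faster, same results.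

-- ===== PORT A =====
def MAX_WORK_TIME : Int := 256 * 25000 * 2

def dig_then_put_for_height_with_blocks (lands : List (List Int)) (flat : Int) (B : Int) : Int :=
  let st : Int × Int :=
    lands.foldl (fun st line =>
      line.foldl (fun (st : Int × Int) block =>
        if block ≥ flat then
          let diff := block - flat
          (st.1 + diff, st.2 + diff * 2)
        else
          let diff := flat - block
          (st.1 - diff, st.2 + diff)) st) (B, 0)
  if st.1 < 0 then MAX_WORK_TIME else st.2

def brute_force_for_min_work_time (lands : List (List Int)) (B : Int) : Int × Int :=
  let MAX_HEIGHT : Int := 256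
  let work_times0 : List Int := List.replicate (MAX_HEIGHT + 1).toNat 0
  let work_times := (PySem.List.pyRange 0 (MAX_HEIGHT + 1) 1).foldl
    (fun wt height => PySem.List.pySetD wt height (dig_then_put_for_height_with_blocks lands height B)) work_times0
  let min_work_time := (PySem.List.min? work_times (fun x => x)).getD 0
  let heights := (PySem.List.pyRange 0 (MAX_HEIGHT + 1) 1).foldl
    (fun hs height => if min_work_time == PySem.List.pyGetD work_times height 0 then hs ++ [height] else hs) []
  (min_work_time, (PySem.List.pyGet? heights (-1)).getD 0)

-- ===== PORT B =====
-- first pass of Source B: (n, total, cnt_neg, sum_neg, cnt) updated per block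
def pvAggStep (st : Int × Int × Int × Int × List Int) (b : Int) : Int × Int × Int × Int × List Int :=
  let (n, total, cnt_neg, sum_neg, cnt) := st
  let n := n + 1
  let total := total + b
  if b < 0 then (n, total, cnt_neg + 1, sum_neg + b, cnt)
  else if b ≤ 256 then (n, total, cnt_neg, sum_neg,
    PySem.List.pySetD cnt b (PySem.List.pyGetD cnt b 0 + 1))
  else (n, total, cnt_neg, sum_neg, cnt)

-- height loop of Source B: state (best, best_h, c, s)
def pvHeightStep (B n total : Int) (cnt : List Int) (st : Option Int × Int × Int × Int) (h : Int) :
    Option Int × Int × Int × Int :=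
  let (best, best_h, c, s) := st
  let dig := (total - s) - h * (n - c)
  let put := h * c - s
  let work := if B + dig - put < 0 then MAX_WORK_TIME else dig * 2 + put
  let (best, best_h) :=
    match best with
    | none => (some work, h)
    | some bv => if work ≤ bv then (some work, h) else (some bv, best_h)
  (best, best_h, c + PySem.List.pyGetD cnt h 0, s + h * PySem.List.pyGetD cnt h 0)

def brute_force_for_min_work_time_alt (lands : List (List Int)) (B : Int) : Int × Int :=
  let agg := lands.foldl (fun st line => line.foldl pvAggStep st) (0, 0, 0, 0, List.replicate 257 0)
  let (n, total, cnt_neg, sum_neg, cnt) := agg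
  let fin := (PySem.List.pyRange 0 257 1).foldl (pvHeightStep B n total cnt) (none, 0, cnt_neg, sum_neg)
  (fin.1.getD 0, fin.2.1)

-- ===== PRECONDITION & SPEC =====
def Spec_brute_force_for_min_work_time (lands : List (List Int)) (B : Int) (out : Int × Int) : Prop := out = brute_force_for_min_work_time_alt lands B
instance (lands : List (List Int)) (B : Int) (out : Int × Int) : Decidable (Spec_brute_force_for_min_work_time lands B out) := by unfold Spec_brute_force_for_min_work_time; infer_instance

-- ===== CLAIM (what is proved, stated in full; the proofs are below) =====
def Claim_equal_brute_force_for_min_work_time : Prop := ∀ (lands : List (List Int)) (B : Int), Dom_brute_force_for_min_work_time lands B → Spec_brute_force_for_min_work_time lands B (brute_force_for_min_work_time lands B)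

-- ===== LEMMAS AND PROOFS =====

-- total dig and put work to flatten the blocks xs at height h
def pvDig (xs : List Int) (h : Int) : Int := (xs.map (fun b => if h ≤ b then b - h else 0)).sum
def pvPut (xs : List Int) (h : Int) : Int := (xs.map (fun b => if h ≤ b then 0 else h - b)).sum
-- work time at height h (the value both programs compute per height)
def pvW (xs : List Int) (B h : Int) : Int :=
  if B + pvDig xs h - pvPut xs h < 0 then MAX_WORK_TIME else 2 * pvDig xs h + pvPut xs h
-- number / sum of blocks strictly below h, and count of blocks equal to v
def pvCntLt (xs : List Int) (h : Int) : Int := (xs.map (fun b => if b < h then (1:Int) else 0)).sum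
def pvSumLt (xs : List Int) (h : Int) : Int := (xs.map (fun b => if b < h then b else 0)).sum
def pvCntEq (xs : List Int) (v : Int) : Int := (xs.map (fun b => if b = v then (1:Int) else 0)).sum
-- the shared "running minimum, last argmin" fold both results reduce to
def pvRunStep (f : Int → Int) (st : Option Int × Int) (h : Int) : Option Int × Int :=
  match st.1 with
  | none => (some (f h), h)
  | some bv => if f h ≤ bv then (some (f h), h) else st
def pvRunMin (f : Int → Int) (hs : List Int) : Option Int × Int := hs.foldl (pvRunStep f) (none, 0)

lemma pvInnerFold (flat : Int) (xs : List Int) : ∀ st : Int × Int,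
    xs.foldl (fun (st : Int × Int) block =>
        if block ≥ flat then
          let diff := block - flat
          (st.1 + diff, st.2 + diff * 2)
        else
          let diff := flat - block
          (st.1 - diff, st.2 + diff)) st
      = (st.1 + pvDig xs flat - pvPut xs flat, st.2 + 2 * pvDig xs flat + pvPut xs flat) := by
  induction xs with
  | nil => intro st; simp [pvDig, pvPut]
  | cons x t ih =>
    intro st
    simp only [List.foldl_cons]
    rw [ih]
    by_cases h : x ≥ flat
    · simp only [if_pos h]
      rw [Prod.mk.injEq]; constructor <;> (simp [pvDig, pvPut, h]; ring)
    · simp only [if_neg h]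
      rw [Prod.mk.injEq]; constructor <;> (simp [pvDig, pvPut, h]; ring)

lemma pvDigThenPut (lands : List (List Int)) (flat B : Int) :
    dig_then_put_for_height_with_blocks lands flat B = pvW lands.flatten B flat := by
  unfold dig_then_put_for_height_with_blocks pvW
  rw [← List.foldl_flatten, pvInnerFold]
  ring_nf

lemma pvRangeNat (n : Nat) : PySem.List.pyRange 0 (n:Int) 1 = List.map (fun k : Nat => (k : Int)) (List.range n) := by
  rw [PySem.List.pyRange_zero_natCast]

lemma pvSetMapRange (g : Nat → Int) (N k : Nat) (v : Int) :
    ((List.range N).map g).set k v = (List.range N).map (fun i => if i = k then v else g i) := by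
  apply List.ext_getElem
  · simp
  · intro i hi hi2
    simp only [List.getElem_set, List.getElem_map, List.getElem_range]
    by_cases h : k = i
    · subst h; simp
    · rw [if_neg h, if_neg (fun hh => h hh.symm)]

-- the work_times-building loop produces the table of pvW values
lemma pvWorkTimes (lands : List (List Int)) (B : Int) :
    (PySem.List.pyRange 0 257 1).foldl
      (fun wt height => PySem.List.pySetD wt height (dig_then_put_for_height_with_blocks lands height B))
      (List.replicate 257 0)
    = (PySem.List.pyRange 0 257 1).map (pvW lands.flatten B) := by
  have aux : ∀ (f : Int → Int) (k : Nat),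
      List.foldl (fun wt h => PySem.List.pySetD wt h (f h)) (List.replicate 257 0)
          ((List.range k).map (fun i : Nat => (i : Int)))
        = (List.range 257).map (fun i : Nat => if i < k then f i else 0) := by
    intro f k
    induction k with
    | zero =>
      simp only [List.range_zero, List.map_nil, List.foldl_nil, Nat.not_lt_zero, if_false]
      rw [List.map_const', List.length_range]
    | succ m ih =>
      rw [List.range_succ, List.map_append, List.foldl_append, ih]
      simp only [List.map_cons, List.map_nil, List.foldl_cons, List.foldl_nil]
      rw [PySem.List.pySetD_of_nonneg _ _ (by positivity), Int.toNat_natCast, pvSetMapRange]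
      apply List.map_congr_left
      intro i _
      by_cases h : i = m
      · subst h; simp
      · simp only [if_neg h]
        have : i < m ↔ i < m + 1 := by omega
        simp [this]
  have h257 : (257:Int) = ((257:Nat):Int) := by norm_num
  rw [h257, pvRangeNat, aux]
  rw [List.map_map]
  apply List.map_congr_left
  intro i hi
  simp only [List.mem_range] at hi
  simp [hi, pvDigThenPut]

-- min-then-last-argmin equals the single running fold
lemma pvMinLast (f : Int → Int) (hs : List Int) (hne : hs ≠ []) :
    pvRunMin f hs
      = (some ((PySem.List.min? (hs.map f) (fun x => x)).getD 0),
         ((hs.filter (fun h => (PySem.List.min? (hs.map f) (fun x => x)).getD 0 == f h)).getLast?).getD 0) := by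
  induction hs using List.reverseRecOn with
  | nil => exact absurd rfl hne
  | append_singleton t x ih =>
    unfold pvRunMin at *
    rw [List.foldl_append, List.foldl_cons, List.foldl_nil]
    by_cases ht : t = []
    · subst ht
      simp [pvRunStep, PySem.List.min?_id_cons]
    · obtain ⟨a, tt, rfl⟩ := List.exists_cons_of_ne_nil ht
      rw [ih (by simp)]
      have hmin : (PySem.List.min? (((a :: tt) ++ [x]).map f) (fun y => y)).getD 0
          = min ((PySem.List.min? ((a :: tt).map f) (fun y => y)).getD 0) (f x) := by
        simp [PySem.List.min?_id_cons, List.foldl_append]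
      set m := (PySem.List.min? ((a :: tt).map f) (fun y => y)).getD 0 with hm
      by_cases hle : f x ≤ m
      · have : (PySem.List.min? (((a :: tt) ++ [x]).map f) (fun y => y)).getD 0 = f x := by
          rw [hmin]; exact min_eq_right hle
        rw [this]
        simp [pvRunStep, hle]
      · have hmx : (PySem.List.min? (((a :: tt) ++ [x]).map f) (fun y => y)).getD 0 = m := by
          rw [hmin]; exact min_eq_left (by omega)
        rw [hmx]
        have hne2 : (m == f x) = false := by
          simp; omega
        simp [pvRunStep, hle, hne2]

lemma pvASide (lands : List (List Int)) (B : Int) :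
    brute_force_for_min_work_time lands B
      = ((pvRunMin (pvW lands.flatten B) (PySem.List.pyRange 0 257 1)).1.getD 0,
         (pvRunMin (pvW lands.flatten B) (PySem.List.pyRange 0 257 1)).2) := by
  have hne : PySem.List.pyRange 0 257 1 ≠ [] := by
    rw [show ((257:Int)) = ((257:Nat):Int) by norm_num, pvRangeNat]; simp
  rw [pvMinLast (pvW lands.flatten B) _ hne]
  simp only [brute_force_for_min_work_time]
  rw [show ((256:Int)+1) = 257 from by norm_num]
  rw [show (Int.toNat 257) = 257 from rfl]
  rw [pvWorkTimes]
  rw [PySem.List.foldl_append_if_eq_filter]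
  rw [List.filter_congr (q := fun h => (PySem.List.min? ((PySem.List.pyRange 0 257 1).map (pvW lands.flatten B)) (fun x => x)).getD 0 == pvW lands.flatten B h) ?_]
  · rw [List.nil_append, PySem.List.pyGet?_neg_one]; simp only [Option.getD_some]
  · intro h hmem
    have hb := (PySem.List.mem_pyRange_one).mp hmem
    rw [PySem.List.pyGetD_map_pyRange_of_nonneg _ _ _ _ (by omega) (by omega)]

-- first pass aggregates
lemma pvAggFold (xs : List Int) : ∀ (n t cn sn : Int) (g : Nat → Int),
    List.foldl pvAggStep (n, t, cn, sn, (List.range 257).map g) xs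
      = (n + xs.length, t + xs.sum, cn + pvCntLt xs 0, sn + pvSumLt xs 0,
         (List.range 257).map (fun v : Nat => g v + pvCntEq xs (v:Int))) := by
  induction xs with
  | nil => intro n t cn sn g; simp [pvCntLt, pvSumLt, pvCntEq]
  | cons b tl ih =>
    intro n t cn sn g
    rw [List.foldl_cons]
    by_cases hb : b < 0
    · rw [show pvAggStep (n, t, cn, sn, (List.range 257).map g) b
          = (n + 1, t + b, cn + 1, sn + b, (List.range 257).map g) from by simp [pvAggStep, hb]]
      rw [ih]
      simp only [Prod.mk.injEq]
      refine ⟨by push_cast [List.length_cons]; ring, by simp [List.sum_cons]; ring, ?_, ?_, ?_⟩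
      · simp only [pvCntLt, List.map_cons, List.sum_cons]; rw [if_pos hb]; ring
      · simp only [pvSumLt, List.map_cons, List.sum_cons]; rw [if_pos hb]; ring
      · apply List.map_congr_left; intro i _
        simp only [pvCntEq, List.map_cons, List.sum_cons]
        rw [if_neg (by omega : ¬ b = (i:Int))]
        ring
    · by_cases hb2 : b ≤ 256
      · rw [show pvAggStep (n, t, cn, sn, (List.range 257).map g) b
            = (n + 1, t + b, cn, sn, PySem.List.pySetD ((List.range 257).map g) b
                (PySem.List.pyGetD ((List.range 257).map g) b 0 + 1)) from by
              simp [pvAggStep, hb, hb2]]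
        have hget : PySem.List.pyGetD ((List.range 257).map g) b 0 = g b.toNat := by
          rw [PySem.List.pyGetD_eq_getElem ((List.range 257).map g) 0 (by omega) (by simp; omega)]
          simp
        rw [hget, PySem.List.pySetD_of_nonneg _ _ (by omega), pvSetMapRange]
        rw [ih]
        simp only [Prod.mk.injEq]
        refine ⟨by push_cast [List.length_cons]; ring, by simp [List.sum_cons]; ring, ?_, ?_, ?_⟩
        · simp only [pvCntLt, List.map_cons, List.sum_cons]; rw [if_neg hb]; ring
        · simp only [pvSumLt, List.map_cons, List.sum_cons]; rw [if_neg hb]; ring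
        · apply List.map_congr_left; intro i _
          simp only [pvCntEq, List.map_cons, List.sum_cons]
          by_cases hi : i = b.toNat
          · subst hi
            rw [if_pos rfl, if_pos (by omega : b = ((b.toNat:Nat):Int))]
            ring
          · rw [if_neg hi, if_neg (by omega : ¬ b = (i:Int))]
            ring
      · rw [show pvAggStep (n, t, cn, sn, (List.range 257).map g) b
            = (n + 1, t + b, cn, sn, (List.range 257).map g) from by simp [pvAggStep, hb, hb2]]
        rw [ih]
        simp only [Prod.mk.injEq]
        refine ⟨by push_cast [List.length_cons]; ring, by simp [List.sum_cons]; ring, ?_, ?_, ?_⟩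
        · simp only [pvCntLt, List.map_cons, List.sum_cons]; rw [if_neg hb]; ring
        · simp only [pvSumLt, List.map_cons, List.sum_cons]; rw [if_neg hb]; ring
        · apply List.map_congr_left; intro i hi
          simp only [List.mem_range] at hi
          simp only [pvCntEq, List.map_cons, List.sum_cons]
          rw [if_neg (by omega : ¬ b = (i:Int))]
          ring

lemma pvCntLtSucc (xs : List Int) (h : Int) : pvCntLt xs (h + 1) = pvCntLt xs h + pvCntEq xs h := by
  induction xs with
  | nil => simp [pvCntLt, pvCntEq]
  | cons b t ih =>
    simp only [pvCntLt, pvCntEq, List.map_cons, List.sum_cons] at *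
    split_ifs <;> omega

lemma pvSumLtSucc (xs : List Int) (h : Int) : pvSumLt xs (h + 1) = pvSumLt xs h + h * pvCntEq xs h := by
  induction xs with
  | nil => simp [pvSumLt, pvCntEq]
  | cons b t ih =>
    simp only [pvSumLt, pvCntEq, List.map_cons, List.sum_cons] at *
    rw [ih]
    split_ifs <;> first | linarith | (exfalso; omega)

lemma pvPutEq (xs : List Int) (h : Int) : pvPut xs h = h * pvCntLt xs h - pvSumLt xs h := by
  induction xs with
  | nil => simp [pvPut, pvCntLt, pvSumLt]
  | cons b t ih =>
    simp only [pvPut, pvCntLt, pvSumLt, List.map_cons, List.sum_cons] at *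
    rw [ih]
    split_ifs <;> linarith

lemma pvDigEq (xs : List Int) (h : Int) :
    pvDig xs h = (xs.sum - pvSumLt xs h) - h * ((xs.length : Int) - pvCntLt xs h) := by
  induction xs with
  | nil => simp [pvDig, pvCntLt, pvSumLt]
  | cons b t ih =>
    simp only [pvDig, pvCntLt, pvSumLt, List.map_cons, List.sum_cons, List.length_cons] at *
    rw [ih]
    push_cast
    split_ifs <;> linarith

-- the height loop tracks (pvRunMin, prefix count, prefix sum)
lemma pvHeightLoop (xs : List Int) (B : Int) :
    ∀ (k : Nat) (a : Nat), a + k = 257 → ∀ (best : Option Int) (bh : Int),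
    (PySem.List.pyRange (a:Int) 257 1).foldl
        (pvHeightStep B xs.length xs.sum ((List.range 257).map (fun v : Nat => pvCntEq xs (v:Int))))
        (best, bh, pvCntLt xs a, pvSumLt xs a)
      = (((PySem.List.pyRange (a:Int) 257 1).foldl (pvRunStep (pvW xs B)) (best, bh)).1,
         ((PySem.List.pyRange (a:Int) 257 1).foldl (pvRunStep (pvW xs B)) (best, bh)).2,
         pvCntLt xs 257, pvSumLt xs 257) := by
  intro k
  induction k with
  | zero =>
    intro a ha best bh
    have h1 : ((a:Nat):Int) = 257 := by omega
    rw [h1]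
    rw [show PySem.List.pyRange 257 257 1 = [] from rfl]
    rfl
  | succ k ihk =>
    intro a ha best bh
    have hlt : ((a:Nat):Int) < 257 := by omega
    rw [PySem.List.pyRange_one_cons hlt, List.foldl_cons, List.foldl_cons]
    have hcnt : PySem.List.pyGetD ((List.range 257).map (fun v : Nat => pvCntEq xs (v:Int))) (a:Int) 0
        = pvCntEq xs (a:Int) := by
      rw [PySem.List.pyGetD_eq_getElem _ 0 (by omega) (by simp; omega)]
      simp
    have hstep : pvHeightStep B xs.length xs.sum ((List.range 257).map (fun v : Nat => pvCntEq xs (v:Int)))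
          (best, bh, pvCntLt xs a, pvSumLt xs a) (a:Int)
        = ((pvRunStep (pvW xs B) (best, bh) (a:Int)).1, (pvRunStep (pvW xs B) (best, bh) (a:Int)).2,
           pvCntLt xs ((a:Int)+1), pvSumLt xs ((a:Int)+1)) := by
      simp only [pvHeightStep, hcnt, ← pvDigEq, ← pvPutEq, pvCntLtSucc, pvSumLtSucc]
      have hW : (if B + pvDig xs (a:Int) - pvPut xs (a:Int) < 0 then MAX_WORK_TIME
          else pvDig xs (a:Int) * 2 + pvPut xs (a:Int)) = pvW xs B (a:Int) := by
        rw [pvW]; split_ifs <;> ring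
      rw [hW]
      cases best <;> simp [pvRunStep]
    rw [hstep]
    have hcast : ((a:Nat):Int) + 1 = (((a+1:Nat)):Int) := by push_cast; ring
    rw [hcast, ihk (a+1) (by omega)]

lemma pvBSide (lands : List (List Int)) (B : Int) :
    brute_force_for_min_work_time_alt lands B
      = ((pvRunMin (pvW lands.flatten B) (PySem.List.pyRange 0 257 1)).1.getD 0,
         (pvRunMin (pvW lands.flatten B) (PySem.List.pyRange 0 257 1)).2) := by
  have hrep : (List.replicate 257 (0:Int)) = (List.range 257).map (fun _ : Nat => (0:Int)) := by
    rw [List.map_const', List.length_range]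
  simp only [brute_force_for_min_work_time_alt]
  rw [← List.foldl_flatten, hrep, pvAggFold]
  simp only [zero_add]
  have hl := pvHeightLoop lands.flatten B 257 0 (by omega) none 0
  simp only [Nat.cast_zero] at hl
  rw [hl]
  simp only [pvRunMin]

-- ===== VERDICT (by name: the statement is the Claim_ definition above) =====
theorem brute_force_for_min_work_time_spec : Claim_equal_brute_force_for_min_work_time := by
  intro lands B _
  unfold Spec_brute_force_for_min_work_time
  rw [pvASide, pvBSide]
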